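-- pv_equiv track=rewrite | github.com/MScherbela/advent_of_code | 2024/12/12.py | merge_fence
-- ===== SOURCE A (Python) =====
-- def merge_fence(fence):
--     n_sides = 0
--     while fence:
--         f_start = fence.pop()
--         if f_start[0] != f_start[2]:
--             # between 2 rows
--             deltas = [(0, -1), (0, 1)]
--         else:
--             # between 2 cols
--             deltas = [(-1, 0), (1, 0)]
--
--         for dr, dc in deltas:
--             f = f_start
--             while True:
--                 neighbour_fence = (f[0] + dr, f[1] + dc, f[2] + dr, f[3] + dc)
--                 if neighbour_fence in fence:
--                     fence.remove(neighbour_fence)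
--                     f = neighbour_fence
--                 else:
--                     break
--         n_sides += 1
--     return n_sides
-- ===== SOURCE B (Python) =====
-- def merge_fence(fence):
--     # Count run-starts: a segment starts a side iff its predecessor along its
--     # line is absent. Drains `fence` (matching A's in-place emptying).
--     segs = set()
--     while fence:
--         segs.add(fence.pop())
--     n = 0
--     for f in segs:
--         if f[0] != f[2]:
--             prev = (f[0], f[1] - 1, f[2], f[3] - 1)
--         else:
--             prev = (f[0] - 1, f[1], f[2] - 1, f[3])
--         if prev not in segs:
--             n += 1
--     return n
-- ===== Notes on version B (the rewrite author's own statement) =====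
-- stated objective: alternative
-- what changed: Replaces A's walk-and-remove traversal (pop a segment, repeatedly look up and remove each collinear neighbour, one side per walk) by a single counting pass: pour the segments into a set and count those whose predecessor along their line is absent (exactly one per maximal run).
import Mathlib
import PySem

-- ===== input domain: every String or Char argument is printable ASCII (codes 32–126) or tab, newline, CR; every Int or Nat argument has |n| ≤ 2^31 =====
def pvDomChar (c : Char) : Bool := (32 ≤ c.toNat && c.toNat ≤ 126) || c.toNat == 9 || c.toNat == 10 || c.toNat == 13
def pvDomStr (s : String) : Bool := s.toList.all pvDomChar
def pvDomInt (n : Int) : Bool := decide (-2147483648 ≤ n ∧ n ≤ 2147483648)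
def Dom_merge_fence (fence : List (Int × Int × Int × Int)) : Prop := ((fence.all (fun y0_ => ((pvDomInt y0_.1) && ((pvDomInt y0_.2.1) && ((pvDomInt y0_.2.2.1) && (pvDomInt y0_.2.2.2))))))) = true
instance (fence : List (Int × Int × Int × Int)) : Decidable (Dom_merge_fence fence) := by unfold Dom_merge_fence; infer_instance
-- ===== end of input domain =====

-- B changes the algorithm: instead of A's walk-and-remove traversal it counts, over the set
-- of segments, those whose predecessor along their line is absent (one per maximal run).
-- Both A and B empty the argument list in place in Python; the equivalence is about the return value.

-- ===== PORT A =====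
-- neighbour_fence = (f[0] + dr, f[1] + dc, f[2] + dr, f[3] + dc)
def nbr (f : Int × Int × Int × Int) (d : Int × Int) : Int × Int × Int × Int :=
  (f.1 + d.1, f.2.1 + d.2, f.2.2.1 + d.1, f.2.2.2 + d.2)

-- the inner 'while True' walk: remove the neighbour while it is present (list.remove = erase first)
def walk (f : Int × Int × Int × Int) (d : Int × Int) (l : List (Int × Int × Int × Int)) :
    (Int × Int × Int × Int) × List (Int × Int × Int × Int) :=
  if _h : nbr f d ∈ l then walk (nbr f d) d (l.erase (nbr f d)) else (f, l)
termination_by l.length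
decreasing_by
  have h1 := List.length_erase_of_mem _h
  have h2 := List.length_pos_of_mem _h
  omega

lemma walk_length_le (f : Int × Int × Int × Int) (d : Int × Int)
    (l : List (Int × Int × Int × Int)) : (walk f d l).2.length ≤ l.length := by
  fun_induction walk f d l with
  | case1 f l h ih =>
      have h1 := List.length_erase_of_mem h
      omega
  | case2 => simp

lemma foldl_walk_length_le (f : Int × Int × Int × Int) (ds : List (Int × Int))
    (l : List (Int × Int × Int × Int)) :
    (ds.foldl (fun r d => (walk f d r).2) l).length ≤ l.length := by
  induction ds generalizing l with
  | nil => simp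
  | cons d ds ih =>
      simp only [List.foldl_cons]
      exact le_trans (ih _) (walk_length_le f d l)

def deltasOf (f : Int × Int × Int × Int) : List (Int × Int) :=
  if f.1 ≠ f.2.2.1 then [(0, -1), (0, 1)] else [(-1, 0), (1, 0)]

-- the outer 'while fence:' loop; pop() takes the last element
def mfLoop (l : List (Int × Int × Int × Int)) (n : Int) : Int :=
  if h : l = [] then n
  else
    mfLoop ((deltasOf (l.getLast h)).foldl (fun r d => (walk (l.getLast h) d r).2) l.dropLast) (n + 1)
termination_by l.length
decreasing_by
  have h1 := foldl_walk_length_le (l.getLast h) (deltasOf (l.getLast h)) l.dropLast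
  have h2 : l.dropLast.length = l.length - 1 := by simp
  have h3 : l ≠ [] := h
  have h4 : 0 < l.length := List.length_pos_iff.mpr h3
  omega

def merge_fence (fence : List (Int × Int × Int × Int)) : Int := mfLoop fence 0

-- ===== PORT B =====
-- prev = the neighbouring segment one step back along the segment's line
def predSeg (f : Int × Int × Int × Int) : Int × Int × Int × Int :=
  if f.1 ≠ f.2.2.1 then (f.1, f.2.1 - 1, f.2.2.1, f.2.2.2 - 1)
  else (f.1 - 1, f.2.1, f.2.2.1 - 1, f.2.2.2)

def merge_fence_alt (fence : List (Int × Int × Int × Int)) : Int :=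
  -- segs = set(); while fence: segs.add(fence.pop())  — adds in reversed order
  let segs : PySem.Set (Int × Int × Int × Int) := PySem.Set.ofList fence.reverse
  -- for f in segs: if prev not in segs: n += 1   (a count: independent of set iteration order)
  segs.foldl (fun n f => if predSeg f ∈ segs then n else n + 1) 0

-- ===== PRECONDITION & SPEC =====
-- The Python argument is a set of segments; under the type convention it arrives as a list of
-- DISTINCT elements. Pre_ states exactly that representation invariant (it excludes no set input).
def Pre_merge_fence (fence : List (Int × Int × Int × Int)) : Prop := fence.Nodup
instance (fence : List (Int × Int × Int × Int)) : Decidable (Pre_merge_fence fence) := by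
  unfold Pre_merge_fence; infer_instance

def pvWitness_merge_fence : (List (Int × Int × Int × Int)) :=
  [(0, 0, 1, 0), (0, 1, 1, 1), (0, 0, 0, 1), (5, 5, 5, 6)]

def Spec_merge_fence (fence : List (Int × Int × Int × Int)) (out : Int) : Prop :=
  out = merge_fence_alt fence
instance (fence : List (Int × Int × Int × Int)) (out : Int) :
    Decidable (Spec_merge_fence fence out) := by unfold Spec_merge_fence; infer_instance

-- ===== CLAIM (what is proved, stated in full; the proofs are below) =====
def Claim_equal_merge_fence : Prop := ∀ (fence : List (Int × Int × Int × Int)),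
  Dom_merge_fence fence → Pre_merge_fence fence → Spec_merge_fence fence (merge_fence fence)

-- ===== LEMMAS AND PROOFS =====

-- The unit step along a segment's line, and its k-fold iterate `shiftSeg`.
def delta (f : Int × Int × Int × Int) : Int × Int :=
  if f.1 ≠ f.2.2.1 then (0, 1) else (1, 0)

def shiftSeg (f : Int × Int × Int × Int) (k : Int) : Int × Int × Int × Int :=
  (f.1 + k * (delta f).1, f.2.1 + k * (delta f).2,
   f.2.2.1 + k * (delta f).1, f.2.2.2 + k * (delta f).2)

lemma delta_trans (f : Int × Int × Int × Int) (k : Int) : delta (shiftSeg f k) = delta f := by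
  obtain ⟨a, b, c, e⟩ := f
  simp only [delta, shiftSeg]
  split_ifs with h1 <;> simp_all

lemma shiftSeg_add (f : Int × Int × Int × Int) (j k : Int) :
    shiftSeg (shiftSeg f j) k = shiftSeg f (j + k) := by
  conv_lhs => rw [shiftSeg.eq_def]
  rw [delta_trans]
  simp only [shiftSeg, Prod.mk.injEq]
  refine ⟨by ring, by ring, by ring, by ring⟩

lemma trans_zero (f : Int × Int × Int × Int) : shiftSeg f 0 = f := by
  obtain ⟨a, b, c, e⟩ := f; simp [shiftSeg]

lemma trans_inj (f : Int × Int × Int × Int) {j k : Int} (h : shiftSeg f j = shiftSeg f k) : j = k := by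
  obtain ⟨a, b, c, e⟩ := f
  simp only [shiftSeg, delta, Prod.mk.injEq] at h
  split_ifs at h <;> omega

lemma predSeg_eq_trans (f : Int × Int × Int × Int) : predSeg f = shiftSeg f (-1) := by
  obtain ⟨a, b, c, e⟩ := f
  simp only [predSeg, shiftSeg, delta]
  split_ifs <;> simp only [Prod.mk.injEq] <;> omega

lemma nbr_sigma (g : Int × Int × Int × Int) (σ : Int) :
    nbr g (σ * (delta g).1, σ * (delta g).2) = shiftSeg g σ := by
  obtain ⟨a, b, c, e⟩ := g; simp [nbr, shiftSeg]

lemma deltasOf_eq (f : Int × Int × Int × Int) :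
    deltasOf f = [((-1) * (delta f).1, (-1) * (delta f).2), (1 * (delta f).1, 1 * (delta f).2)] := by
  simp only [deltasOf, delta]
  split_ifs <;> norm_num

-- run-start count: number of segments whose predecessor along their line is absent
def countStarts (s : List (Int × Int × Int × Int)) : ℕ :=
  s.countP (fun g => !decide (shiftSeg g (-1) ∈ s))

lemma countStarts_perm {s t : List (Int × Int × Int × Int)} (h : s.Perm t) :
    countStarts s = countStarts t := by
  unfold countStarts
  calc s.countP (fun g => !decide (shiftSeg g (-1) ∈ s))
      = s.countP (fun g => !decide (shiftSeg g (-1) ∈ t)) := by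
        apply List.countP_congr; intro g _; simp [h.mem_iff]
    _ = t.countP (fun g => !decide (shiftSeg g (-1) ∈ t)) := h.countP_eq _

lemma countStarts_eq_of_mem_iff {s t : List (Int × Int × Int × Int)}
    (hs : s.Nodup) (ht : t.Nodup) (h : ∀ g, g ∈ s ↔ g ∈ t) :
    countStarts s = countStarts t :=
  countStarts_perm ((List.perm_ext_iff_of_nodup hs ht).mpr h)

-- ----- the walk removes exactly a maximal chain -----
lemma walk_spec (σ : Int) (hσ : σ = 1 ∨ σ = -1) :
    ∀ (n : ℕ) (s : List (Int × Int × Int × Int)), s.length = n → s.Nodup →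
    ∀ f, ∃ k : ℕ,
      (walk f (σ * (delta f).1, σ * (delta f).2) s).2.Nodup ∧
      (∀ g, g ∈ (walk f (σ * (delta f).1, σ * (delta f).2) s).2 ↔
        g ∈ s ∧ ∀ i : ℕ, 1 ≤ i → i ≤ k → g ≠ shiftSeg f (σ * i)) ∧
      shiftSeg f (σ * (k + 1)) ∉ s ∧
      (∀ i : ℕ, 1 ≤ i → i ≤ k → shiftSeg f (σ * i) ∈ s) ∧
      (walk f (σ * (delta f).1, σ * (delta f).2) s).2.length + k = s.length := by
  intro n
  induction n using Nat.strong_induction_on with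
  | _ n ih =>
    intro s hlen hnd f
    have hnbr : nbr f (σ * (delta f).1, σ * (delta f).2) = shiftSeg f σ := nbr_sigma f σ
    rw [walk.eq_def]
    by_cases h : nbr f (σ * (delta f).1, σ * (delta f).2) ∈ s
    · rw [dif_pos h]
      rw [hnbr] at h ⊢
      have hd : delta (shiftSeg f σ) = delta f := delta_trans f σ
      have hrec :
          walk (shiftSeg f σ) (σ * (delta f).1, σ * (delta f).2) (s.erase (shiftSeg f σ)) =
          walk (shiftSeg f σ) (σ * (delta (shiftSeg f σ)).1, σ * (delta (shiftSeg f σ)).2)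
            (s.erase (shiftSeg f σ)) := by rw [hd]
      rw [hrec]
      have hlt : (s.erase (shiftSeg f σ)).length < n := by
        have h1 := List.length_erase_of_mem h
        have h2 := List.length_pos_of_mem h
        omega
      obtain ⟨k', hnd', hmem', hbd', hin', hlen'⟩ :=
        ih (s.erase (shiftSeg f σ)).length hlt (s.erase (shiftSeg f σ)) rfl
          (hnd.erase _) (shiftSeg f σ)
      have hshift : ∀ i : ℕ, shiftSeg (shiftSeg f σ) (σ * (i : ℤ)) = shiftSeg f (σ * ((i : ℤ) + 1)) := by
        intro i
        rw [shiftSeg_add]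
        exact congrArg (shiftSeg f) (by ring)
      have hinj : ∀ j k : ℤ, shiftSeg f j = shiftSeg f k → j = k := fun j k hh => trans_inj f hh
      have hme : ∀ g : Int × Int × Int × Int,
          g ∈ s.erase (shiftSeg f σ) ↔ g ≠ shiftSeg f σ ∧ g ∈ s := by
        intro g; exact List.Nodup.mem_erase_iff hnd
      refine ⟨k' + 1, hnd', ?_, ?_, ?_, ?_⟩
      · intro g
        rw [hmem' g, hme g]
        constructor
        · rintro ⟨⟨hgne, hgs⟩, hch⟩
          refine ⟨hgs, ?_⟩
          intro i hi1 hik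
          rcases eq_or_lt_of_le hi1 with h1 | h1
          · rw [← h1]
            have : shiftSeg f (σ * ((1 : ℕ) : ℤ)) = shiftSeg f σ :=
              congrArg (shiftSeg f) (by push_cast; ring)
            rw [this]; exact hgne
          · have hi' : 1 ≤ i - 1 ∧ i - 1 ≤ k' := by omega
            have := hch (i - 1) hi'.1 hi'.2
            rw [hshift (i - 1)] at this
            have hcast : ((i - 1 : ℕ) : ℤ) + 1 = (i : ℤ) := by
              have : (1 : ℕ) ≤ i := by omega
              push_cast [Nat.cast_sub this]; ring
            rw [hcast] at this
            exact this
        · rintro ⟨hgs, hall⟩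
          have hg1 : g ≠ shiftSeg f σ := by
            have := hall 1 le_rfl (by omega)
            have he : shiftSeg f (σ * ((1 : ℕ) : ℤ)) = shiftSeg f σ :=
              congrArg (shiftSeg f) (by push_cast; ring)
            rw [he] at this; exact this
          refine ⟨⟨hg1, hgs⟩, ?_⟩
          intro i hi1 hik
          rw [hshift i]
          have hcast : ((i : ℤ) + 1) = ((i + 1 : ℕ) : ℤ) := by push_cast; ring
          rw [hcast]
          exact hall (i + 1) (by omega) (by omega)
      · -- boundary: shiftSeg f (σ * (k' + 2)) ∉ s
        have hb : shiftSeg (shiftSeg f σ) (σ * ((k' : ℤ) + 1)) = shiftSeg f (σ * ((k' : ℤ) + 2)) := by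
          rw [shiftSeg_add]; exact congrArg (shiftSeg f) (by ring)
        intro hcon
        have hne : shiftSeg f (σ * (((k' + 1 : ℕ) : ℤ) + 1)) ≠ shiftSeg f σ := by
          intro hh
          have := hinj _ _ hh
          rcases hσ with rfl | rfl <;> push_cast at this <;> omega
        apply hbd'
        rw [hb]
        have hcast2 : shiftSeg f (σ * ((k' : ℤ) + 2)) = shiftSeg f (σ * (((k' + 1 : ℕ) : ℤ) + 1)) :=
          congrArg (shiftSeg f) (by push_cast; ring)
        rw [hcast2, hme _]
        refine ⟨hne, ?_⟩
        rw [← hcast2]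
        exact hcon
      · intro i hi1 hik
        rcases eq_or_lt_of_le hi1 with h1 | h1
        · rw [← h1]
          have he : shiftSeg f (σ * ((1 : ℕ) : ℤ)) = shiftSeg f σ :=
            congrArg (shiftSeg f) (by push_cast; ring)
          rw [he]; exact h
        · have hi' : 1 ≤ i - 1 ∧ i - 1 ≤ k' := by omega
          have := hin' (i - 1) hi'.1 hi'.2
          rw [hshift (i - 1)] at this
          have hcast : ((i - 1 : ℕ) : ℤ) + 1 = (i : ℤ) := by
            have : (1 : ℕ) ≤ i := by omega
            push_cast [Nat.cast_sub this]; ring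
          rw [hcast] at this
          exact List.mem_of_mem_erase this
      · have h1 := List.length_erase_of_mem h
        have h2 := List.length_pos_of_mem h
        omega
    · rw [dif_neg h]
      refine ⟨0, hnd, ?_, ?_, ?_, ?_⟩
      · intro g; constructor
        · intro hg; exact ⟨hg, by intro i h1 h2; omega⟩
        · intro hg; exact hg.1
      · have he : shiftSeg f (σ * ((0 : ℕ) + 1 : ℤ)) = shiftSeg f σ :=
          congrArg (shiftSeg f) (by push_cast; ring)
        rw [hnbr] at h
        simpa [he] using h
      · intro i h1 h2; omega
      · simp

lemma shiftSeg_cancel (g : Int × Int × Int × Int) {x : Int × Int × Int × Int}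
    (h : shiftSeg g (-1) = x) : g = shiftSeg x 1 := by
  rw [← h, shiftSeg_add]
  exact (congrArg (shiftSeg g) (by ring)).trans (trans_zero g) |>.symm

lemma erase_count (s : List (Int × Int × Int × Int)) (hnd : s.Nodup)
    (x : Int × Int × Int × Int) (hx : x ∈ s) (hsucc : shiftSeg x 1 ∉ s) :
    countStarts s = countStarts (s.erase x) + (if shiftSeg x (-1) ∈ s then 0 else 1) := by
  have hperm : s.Perm (x :: s.erase x) := List.perm_cons_erase hx
  unfold countStarts
  rw [hperm.countP_eq, List.countP_cons]
  have hstep : (s.erase x).countP (fun g => !decide (shiftSeg g (-1) ∈ s)) =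
      (s.erase x).countP (fun g => !decide (shiftSeg g (-1) ∈ s.erase x)) := by
    apply List.countP_congr
    intro g hg
    have hgs : g ∈ s := List.mem_of_mem_erase hg
    have hne : shiftSeg g (-1) ≠ x := by
      intro hh
      exact hsucc (shiftSeg_cancel g hh ▸ hgs)
    simp [List.Nodup.mem_erase_iff hnd, hne]
  rw [hstep]
  by_cases hp : shiftSeg x (-1) ∈ s
  · simp [hp]
  · simp [hp]

-- ----- counting: removing one maximal run decreases countStarts by exactly 1 -----
lemma run_count :
    ∀ (m : ℕ) (s : List (Int × Int × Int × Int)) (f : Int × Int × Int × Int) (a b : Int),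
    (b - a).toNat = m → a ≤ b → s.Nodup →
    (∀ i, a ≤ i → i ≤ b → shiftSeg f i ∈ s) →
    shiftSeg f (a - 1) ∉ s → shiftSeg f (b + 1) ∉ s →
    ∀ t : List (Int × Int × Int × Int), t.Nodup →
    (∀ g, g ∈ t ↔ g ∈ s ∧ ∀ i, a ≤ i → i ≤ b → g ≠ shiftSeg f i) →
    countStarts s = countStarts t + 1 := by
  intro m
  induction m with
  | zero =>
    intro s f a b hm hab hnd hmem hlo hhi t hndt hct
    have hba : b = a := by omega
    subst hba
    have hx : shiftSeg f b ∈ s := hmem b le_rfl le_rfl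
    have hs1 : shiftSeg (shiftSeg f b) 1 = shiftSeg f (b + 1) := shiftSeg_add f b 1
    have hs2 : shiftSeg (shiftSeg f b) (-1) = shiftSeg f (b - 1) := by
      rw [shiftSeg_add]; exact congrArg (shiftSeg f) (by ring)
    have := erase_count s hnd (shiftSeg f b) hx (by rw [hs1]; exact hhi)
    rw [hs2] at this
    have hlo' : shiftSeg f (b - 1) ∉ s := by
      have : b - 1 = b - 1 := rfl
      exact hlo
    rw [if_neg hlo'] at this
    rw [this]
    congr 1
    apply countStarts_eq_of_mem_iff (hnd.erase _) hndt
    intro g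
    rw [List.Nodup.mem_erase_iff hnd, hct g]
    constructor
    · rintro ⟨hne, hgs⟩
      refine ⟨hgs, ?_⟩
      intro i h1 h2
      have : i = b := by omega
      subst this; exact hne
    · rintro ⟨hgs, hall⟩
      exact ⟨hall b le_rfl le_rfl, hgs⟩
  | succ m ihm =>
    intro s f a b hm hab hnd hmem hlo hhi t hndt hct
    have hba : a < b := by omega
    have hx : shiftSeg f b ∈ s := hmem b hab le_rfl
    have hs1 : shiftSeg (shiftSeg f b) 1 = shiftSeg f (b + 1) := shiftSeg_add f b 1
    have hs2 : shiftSeg (shiftSeg f b) (-1) = shiftSeg f (b - 1) := by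
      rw [shiftSeg_add]; exact congrArg (shiftSeg f) (by ring)
    have hec := erase_count s hnd (shiftSeg f b) hx (by rw [hs1]; exact hhi)
    rw [hs2] at hec
    have hpred : shiftSeg f (b - 1) ∈ s := hmem (b - 1) (by omega) (by omega)
    rw [if_pos hpred] at hec
    rw [hec]
    have hinj : ∀ j k : ℤ, shiftSeg f j = shiftSeg f k → j = k := fun j k hh => trans_inj f hh
    apply ihm (s.erase (shiftSeg f b)) f a (b - 1) (by omega) (by omega) (hnd.erase _)
    · intro i h1 h2
      rw [List.Nodup.mem_erase_iff hnd]
      refine ⟨?_, hmem i h1 (by omega)⟩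
      intro hh
      have := hinj _ _ hh
      omega
    · intro hh
      exact hlo (List.mem_of_mem_erase hh)
    · have hb : b - 1 + 1 = b := by ring
      rw [hb]
      intro hh
      rw [List.Nodup.mem_erase_iff hnd] at hh
      exact hh.1 rfl
    · exact hndt
    · intro g
      rw [hct g, List.Nodup.mem_erase_iff hnd]
      constructor
      · rintro ⟨hgs, hall⟩
        exact ⟨⟨hall b hab le_rfl, hgs⟩, fun i h1 h2 => hall i h1 (by omega)⟩
      · rintro ⟨⟨hne, hgs⟩, hall⟩
        refine ⟨hgs, ?_⟩
        intro i h1 h2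
        rcases eq_or_lt_of_le h2 with h3 | h3
        · subst h3; exact hne
        · exact hall i h1 (by omega)

-- ----- one outer iteration -----
lemma step_count (l : List (Int × Int × Int × Int)) (hn : l.Nodup) (hne : l ≠ []) :
    countStarts l =
      countStarts ((deltasOf (l.getLast hne)).foldl
        (fun r d => (walk (l.getLast hne) d r).2) l.dropLast) + 1 ∧
    ((deltasOf (l.getLast hne)).foldl
        (fun r d => (walk (l.getLast hne) d r).2) l.dropLast).Nodup ∧
    ((deltasOf (l.getLast hne)).foldl
        (fun r d => (walk (l.getLast hne) d r).2) l.dropLast).length < l.length := by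
  set f := l.getLast hne with hf
  have hl : l.dropLast ++ [f] = l := List.dropLast_append_getLast hne
  have hrn : l.dropLast.Nodup := (List.dropLast_sublist l).nodup hn
  have hfr : f ∉ l.dropLast := by
    have hh : (l.dropLast ++ [f]).Nodup := by rw [hl]; exact hn
    simp only [List.nodup_append] at hh
    intro hmem
    exact hh.2.2 f hmem f (List.mem_singleton_self f) rfl
  rw [deltasOf_eq f]
  simp only [List.foldl_cons, List.foldl_nil]
  obtain ⟨k1, hnd1, hmem1, hbd1, hin1, hlen1⟩ :=
    walk_spec (-1) (Or.inr rfl) l.dropLast.length l.dropLast rfl hrn f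
  set r1 := (walk f ((-1) * (delta f).1, (-1) * (delta f).2) l.dropLast).2 with hr1
  obtain ⟨k2, hnd2, hmem2, hbd2, hin2, hlen2⟩ :=
    walk_spec 1 (Or.inl rfl) r1.length r1 rfl hnd1 f
  set r2 := (walk f (1 * (delta f).1, 1 * (delta f).2) r1).2 with hr2
  have hinj : ∀ j k : ℤ, shiftSeg f j = shiftSeg f k → j = k := fun j k hh => trans_inj f hh
  have hmeml : ∀ g : Int × Int × Int × Int, g ∈ l ↔ g ∈ l.dropLast ∨ g = f := by
    intro g; rw [← hl]; simp
  have hlpos : 0 < l.length := List.length_pos_iff.mpr hne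
  have hdll : l.dropLast.length = l.length - 1 := by simp
  refine ⟨?_, hnd2, by omega⟩
  apply run_count ((k2 : ℤ) - (-(k1 : ℤ))).toNat l f (-(k1 : ℤ)) (k2 : ℤ) rfl (by omega) hn
  · -- all run members are in l
    intro i h1 h2
    rcases lt_trichotomy i 0 with hi | hi | hi
    · have hj1 : 1 ≤ (-i).toNat := by omega
      have hj2 : (-i).toNat ≤ k1 := by omega
      have := hin1 (-i).toNat hj1 hj2
      have hc : (-1 : ℤ) * ((-i).toNat : ℤ) = i := by omega
      rw [hc] at this
      rw [hmeml]; exact Or.inl this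
    · subst hi
      rw [trans_zero]
      rw [hmeml]; exact Or.inr rfl
    · have hj1 : 1 ≤ i.toNat := by omega
      have hj2 : i.toNat ≤ k2 := by omega
      have := hin2 i.toNat hj1 hj2
      have hc : (1 : ℤ) * (i.toNat : ℤ) = i := by omega
      rw [hc] at this
      rw [hmem1] at this
      rw [hmeml]; exact Or.inl this.1
  · -- below the run
    intro hcon
    rw [hmeml] at hcon
    rcases hcon with hcon | hcon
    · apply hbd1
      have hc : (-1 : ℤ) * ((k1 : ℤ) + 1) = -(k1 : ℤ) - 1 := by ring
      rw [hc]; exact hcon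
    · have := hinj _ _ (hcon.trans (trans_zero f).symm)
      omega
  · -- above the run
    intro hcon
    rw [hmeml] at hcon
    rcases hcon with hcon | hcon
    · apply hbd2
      have hc : (1 : ℤ) * ((k2 : ℤ) + 1) = (k2 : ℤ) + 1 := by ring
      rw [hc]
      rw [hmem1]
      refine ⟨hcon, ?_⟩
      intro j hj1 hj2 hh
      have := hinj _ _ hh
      omega
    · have := hinj _ _ (hcon.trans (trans_zero f).symm)
      omega
  · exact hnd2
  · -- r2 = l minus the run
    intro g
    rw [hmem2 g, hmem1 g, hmeml g]
    constructor
    · rintro ⟨⟨hgr, hneg⟩, hpos⟩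
      refine ⟨Or.inl hgr, ?_⟩
      intro i h1 h2
      rcases lt_trichotomy i 0 with hi | hi | hi
      · have := hneg (-i).toNat (by omega) (by omega)
        have hc : (-1 : ℤ) * ((-i).toNat : ℤ) = i := by omega
        rw [hc] at this; exact this
      · subst hi
        rw [trans_zero]
        intro hh; exact hfr (hh ▸ hgr)
      · have := hpos i.toNat (by omega) (by omega)
        have hc : (1 : ℤ) * (i.toNat : ℤ) = i := by omega
        rw [hc] at this; exact this
    · rintro ⟨hgl, hall⟩
      have hgne : g ≠ f := by
        have := hall 0 (by omega) (by omega)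
        rw [trans_zero] at this; exact this
      have hgr : g ∈ l.dropLast := by
        rcases hgl with hh | hh
        · exact hh
        · exact absurd hh hgne
      refine ⟨⟨hgr, ?_⟩, ?_⟩
      · intro j hj1 hj2
        have := hall ((-1) * (j : ℤ)) (by omega) (by omega)
        exact this
      · intro j hj1 hj2
        have := hall ((1 : ℤ) * (j : ℤ)) (by omega) (by omega)
        exact this

lemma mfLoop_eq : ∀ (N : ℕ) (l : List (Int × Int × Int × Int)), l.length = N → l.Nodup →
    ∀ m : Int, mfLoop l m = m + (countStarts l : Int) := by
  intro N
  induction N using Nat.strong_induction_on with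
  | _ N ih =>
    intro l hlen hnd m
    rw [mfLoop]
    by_cases h : l = []
    · subst h
      simp [countStarts]
    · rw [dif_neg h]
      obtain ⟨hcount, hnd2, hlt⟩ := step_count l hnd h
      rw [ih _ (by omega) _ rfl hnd2 (m + 1)]
      rw [hcount]
      push_cast
      ring

lemma alt_eq (fence : List (Int × Int × Int × Int)) (h : fence.Nodup) :
    merge_fence_alt fence = (countStarts fence : Int) := by
  have hrev : fence.reverse.Nodup := by simpa using h
  show List.foldl (fun n f => if predSeg f ∈ PySem.Set.ofList fence.reverse then n else n + 1) 0
    (PySem.Set.ofList fence.reverse) = _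
  rw [PySem.Set.ofList_eq_self_of_nodup _ hrev]
  have hfold : ∀ (l : List (Int × Int × Int × Int)) (n : Int),
      l.foldl (fun n f => if predSeg f ∈ fence.reverse then n else n + 1) n =
      n + (l.countP (fun f => !decide (shiftSeg f (-1) ∈ fence)) : Int) := by
    intro l
    induction l with
    | nil => simp
    | cons x t iht =>
      intro n
      simp only [List.foldl_cons, List.countP_cons, iht]
      rw [predSeg_eq_trans]
      by_cases hx : shiftSeg x (-1) ∈ fence
      · rw [if_pos (by simpa using hx)]
        simp [hx]
      · rw [if_neg (by simpa using hx)]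
        simp [hx]
        ring
  rw [hfold]
  unfold countStarts
  rw [List.countP_reverse]
  ring

-- ===== VERDICT (by name: the statement is the Claim_ definition above) =====
theorem merge_fence_spec : Claim_equal_merge_fence := by
  intro fence _ hpre
  unfold Spec_merge_fence merge_fence
  rw [mfLoop_eq fence.length fence rfl hpre 0, alt_eq fence hpre]
  ring
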